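-- pv_equiv track=rewrite | github.com/ttvpro007/PythonProblems | labs109.py | mcculloch
-- ===== SOURCE A (Python) =====
-- def mcculloch(digits):
--
--     command_dict = {
--         '3' : lambda y : y + '2' + y,
--         '4' : lambda y : y[ : : -1 ],
--         '5' : lambda y : y + y
--     }
--
--     # the first '2' is the break number between
--     # the commands and the part we need to work on which is y
--     break_index = digits.index('2')
--
--     y = digits[ break_index + 1 : ]
--     commands = digits[ : break_index ]
--
--     for command in command_dict['4'](commands):
--         y = command_dict[command](y)
--
--     return y
-- ===== SOURCE B (Python) =====
-- def mcculloch(digits):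
--     # Split at the first '2': commands before it, y after it.
--     commands, _, y = digits.partition('2')
--     # Process commands right-to-left, tracking pending reversal with a flag
--     # instead of reversing y each time ('3' and '5' commute with reversal
--     # since the sandwiched segment is palindromic).
--     rev = False
--     for c in reversed(commands):
--         if c == '3':
--             y = y + '2' + y
--         elif c == '5':
--             y = y + y
--         elif c == '4':
--             rev = not rev
--         else:
--             raise KeyError(c)
--     return y[::-1] if rev else y
-- ===== Notes on version B (the rewrite author's own statement) =====
-- stated objective: alternative
-- what changed: B splits on the first '2' with partition and processes the commands with a pending-reversal boolean flag (flipped on '4', resolved by one reversal at the end) instead of A's dict of lambdas that eagerly reverses y on every '4'.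
import Mathlib
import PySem

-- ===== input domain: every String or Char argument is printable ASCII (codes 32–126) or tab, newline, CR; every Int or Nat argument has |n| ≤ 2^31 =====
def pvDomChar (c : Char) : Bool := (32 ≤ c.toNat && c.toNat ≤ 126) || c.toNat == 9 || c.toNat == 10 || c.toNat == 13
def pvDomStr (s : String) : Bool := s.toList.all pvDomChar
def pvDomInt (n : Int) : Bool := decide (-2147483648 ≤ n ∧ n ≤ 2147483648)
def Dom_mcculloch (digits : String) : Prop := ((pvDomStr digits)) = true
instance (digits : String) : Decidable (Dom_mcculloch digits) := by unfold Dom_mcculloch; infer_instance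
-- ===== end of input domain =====

-- B replaces A's eager string reversal on each '4' by a pending-reversal flag resolved once at the end (alternative decomposition, same cost).


-- ===== PORT A =====
-- y[::-1] in A's dict, ported exactly (PySem.List.slice?_none_none_neg_one: step -1 slice = reverse)
def mccRev (y : List Char) : List Char := (PySem.List.slice? y none none (-1)).getD []

-- command_dict lookup + application; an unknown command is a KeyError in Python (excluded by Pre_), here the state is returned unchanged
def mccStep (y : List Char) (c : Char) : List Char :=
  if c = '3' then y ++ '2' :: y
  else if c = '4' then mccRev y
  else if c = '5' then y ++ y
  else y

def mcculloch (digits : String) : String :=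
  let s := digits.toList
  match PySem.List.index? s '2' with
  | none => ""   -- digits.index('2') raises ValueError here; excluded by Pre_
  | some i =>
      let y := PySem.List.slice s (some ((i : Int) + 1)) none
      let commands := PySem.List.slice s none (some (i : Int))
      String.mk ((mccRev commands).foldl mccStep y)

-- ===== PORT B =====
-- one step of B: state is (y, pending-reversal flag); unknown command = KeyError (excluded by Pre_), state unchanged
def mccAltStep (st : List Char × Bool) (c : Char) : List Char × Bool :=
  if c = '3' then (st.1 ++ '2' :: st.1, st.2)
  else if c = '5' then (st.1 ++ st.1, st.2)
  else if c = '4' then (st.1, !st.2)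
  else st

def mcculloch_alt (digits : String) : String :=
  let s := digits.toList
  -- digits.partition('2'): prefix before first '2', rest after it ('' if absent)
  let commands := s.takeWhile (· ≠ '2')
  let y0 := (s.dropWhile (· ≠ '2')).drop 1
  let st := commands.reverse.foldl mccAltStep (y0, false)
  String.mk (if st.2 then st.1.reverse else st.1)

-- ===== PRECONDITION & SPEC =====
-- Pre_ excludes exactly the inputs where A raises: no '2' at all (ValueError from .index),
-- or a character other than '3'/'4'/'5' before the first '2' (KeyError from the dict lookup).
def Pre_mcculloch (digits : String) : Prop :=
  '2' ∈ digits.toList ∧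
  (digits.toList.takeWhile (· ≠ '2')).all (fun c => c == '3' || c == '4' || c == '5') = true
instance (digits : String) : Decidable (Pre_mcculloch digits) := by unfold Pre_mcculloch; infer_instance

def pvWitness_mcculloch : String := "2"

def Spec_mcculloch (digits : String) (out : String) : Prop := out = mcculloch_alt digits
instance (digits : String) (out : String) : Decidable (Spec_mcculloch digits out) := by unfold Spec_mcculloch; infer_instance

-- ===== CLAIM (what is proved, stated in full; the proofs are below) =====
def Claim_equal_mcculloch : Prop := ∀ (digits : String), Dom_mcculloch digits → Pre_mcculloch digits → Spec_mcculloch digits (mcculloch digits)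

-- ===== LEMMAS AND PROOFS =====

-- the loop invariant: folding A's steps from the (conditionally reversed) state equals
-- folding B's flagged steps and resolving the flag at the end
lemma mcc_loop_inv (cs : List Char) : ∀ (y : List Char) (f : Bool),
    cs.foldl mccStep (if f then y.reverse else y) =
      (let st := cs.foldl mccAltStep (y, f); if st.2 then st.1.reverse else st.1) := by
  induction cs with
  | nil => intro y f; rfl
  | cons c cs ih =>
      intro y f
      simp only [List.foldl_cons]
      by_cases h3 : c = '3'
      · have : mccStep (if f then y.reverse else y) c =
            (if f then (y ++ '2' :: y).reverse else (y ++ '2' :: y)) := by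
          cases f <;> simp [mccStep, h3]
        rw [this, ih]
        simp [mccAltStep, h3]
      · by_cases h4 : c = '4'
        · have : mccStep (if f then y.reverse else y) c =
              (if !f then y.reverse else y) := by
            cases f <;> simp [mccStep, h4, PySem.List.slice?_none_none_neg_one, mccRev]
          rw [this, ih]
          simp [mccAltStep, h4]
        · by_cases h5 : c = '5'
          · have : mccStep (if f then y.reverse else y) c =
                (if f then (y ++ y).reverse else (y ++ y)) := by
              cases f <;> simp [mccStep, h5]
            rw [this, ih]
            simp [mccAltStep, h5]
          · have : mccStep (if f then y.reverse else y) c = (if f then y.reverse else y) := by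
              simp [mccStep, h3, h4, h5]
            rw [this, ih]
            simp [mccAltStep, h3, h4, h5]

-- index? locating the first '2' pins down A's two slices as B's takeWhile/dropWhile split
lemma mcc_takeWhile (pre suf : List Char) (hmem : '2' ∉ pre) :
    (pre ++ '2' :: suf).takeWhile (· ≠ '2') = pre := by
  induction pre with
  | nil => simp
  | cons a t ihp =>
      have ha : a ≠ '2' := by simp at hmem; tauto
      have ht : '2' ∉ t := by simp at hmem; tauto
      simpa [ha] using ihp ht

lemma mcc_dropWhile (pre suf : List Char) (hmem : '2' ∉ pre) :
    (pre ++ '2' :: suf).dropWhile (· ≠ '2') = '2' :: suf := by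
  induction pre with
  | nil => simp
  | cons a t ihp =>
      have ha : a ≠ '2' := by simp at hmem; tauto
      have ht : '2' ∉ t := by simp at hmem; tauto
      simpa [ha] using ihp ht

lemma mcc_split (s : List Char) (i : Nat) (h : PySem.List.index? s '2' = some i) :
    PySem.List.slice s none (some (i : Int)) = s.takeWhile (· ≠ '2') ∧
    PySem.List.slice s (some ((i : Int) + 1)) none = (s.dropWhile (· ≠ '2')).drop 1 := by
  obtain ⟨pre, suf, hs, hlen, hmem⟩ := (PySem.List.index?_eq_some_iff _ _ _).mp h
  subst hs
  constructor
  · rw [PySem.List.slice_to_natCast, mcc_takeWhile pre suf hmem, ← hlen]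
    simp
  · have hc : (i : Int) + 1 = ((i + 1 : Nat) : Int) := by push_cast; ring
    rw [hc, PySem.List.slice_from_natCast, mcc_dropWhile pre suf hmem, ← hlen]
    simp [List.drop_append]

-- ===== VERDICT (by name: the statement is the Claim_ definition above) =====
theorem mcculloch_spec : Claim_equal_mcculloch := by
  intro digits _ hpre
  obtain ⟨h2, _⟩ := hpre
  unfold Spec_mcculloch mcculloch mcculloch_alt
  have hsome : (PySem.List.index? digits.toList '2').isSome := by
    rw [PySem.List.index?_isSome_iff]; exact h2
  obtain ⟨i, hi⟩ := Option.isSome_iff_exists.mp hsome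
  obtain ⟨ht, hd⟩ := mcc_split digits.toList i hi
  simp only [hi, ht, hd]
  have hrev : mccRev (digits.toList.takeWhile (· ≠ '2')) =
      (digits.toList.takeWhile (· ≠ '2')).reverse := by
    simp [mccRev, PySem.List.slice?_none_none_neg_one]
  rw [hrev]
  have := mcc_loop_inv (digits.toList.takeWhile (· ≠ '2')).reverse
    ((digits.toList.dropWhile (· ≠ '2')).drop 1) false
  exact congrArg String.mk (by simpa using this)
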